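-- pv_equiv track=rewrite | github.com/getabear/leetcode | 最长上升子序列.py | fun
-- ===== SOURCE A (Python) =====
-- def fun(nums):
--     count=1
--     ret=1
--     length=len(nums)
--     # temp=nums[0]
--     for i in range(length):
--         j=i+1
--         temp=nums[i]
--         for j in range(j,length):
--             if(nums[j]>temp):
--                 temp=nums[j]
--                 count+=1
--                 if(count>ret):
--                     ret=count
--         count=1
--
--     return ret
--
-- nums=[10,1,2,2,2,7,101,18]
-- ===== SOURCE B (Python) =====
-- def fun(nums):
--     # O(n): scan right-to-left keeping a strictly increasing stack (top = smallest);
--     # after pushing x, the stack is exactly the chain of greedy records starting there.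
--     stack = []
--     best = 1
--     for x in reversed(nums):
--         while stack and stack[-1] <= x:
--             stack.pop()
--         stack.append(x)
--         if len(stack) > best:
--             best = len(stack)
--     return best
-- ===== Notes on version B (the rewrite author's own statement) =====
-- stated objective: faster
-- what changed: Instead of rescanning the whole suffix for every start index to count greedy increasing records, B makes one right-to-left pass with a monotonic stack whose height after pushing x equals the record-chain length starting at x, taking the running maximum.
import Mathlib
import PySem

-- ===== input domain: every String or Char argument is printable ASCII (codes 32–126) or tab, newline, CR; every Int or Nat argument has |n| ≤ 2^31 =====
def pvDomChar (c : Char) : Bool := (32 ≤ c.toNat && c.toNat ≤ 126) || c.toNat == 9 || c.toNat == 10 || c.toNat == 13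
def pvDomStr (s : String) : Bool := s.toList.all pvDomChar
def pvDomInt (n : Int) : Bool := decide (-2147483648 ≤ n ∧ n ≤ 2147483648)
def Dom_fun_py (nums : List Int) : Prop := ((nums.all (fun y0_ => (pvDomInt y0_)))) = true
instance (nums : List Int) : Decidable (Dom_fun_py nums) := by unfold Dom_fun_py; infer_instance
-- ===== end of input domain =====

-- B replaces A's quadratic per-start rescan by one right-to-left monotonic-stack pass (objective: faster).

-- ===== PORT A =====
-- the body of A's inner loop (temp, count, ret updated when nums[j] > temp)
def pvInnerStep (s : Int × Int × Int) (nj : Int) : Int × Int × Int :=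
  if nj > s.1 then (nj, s.2.1 + 1, if s.2.1 + 1 > s.2.2 then s.2.1 + 1 else s.2.2) else s

def fun_py (nums : List Int) : Int :=
  ((PySem.List.pyRange 0 (nums.length : Int) 1).foldl
    (fun (st : Int × Int) i =>
      (1, (((PySem.List.pyRange (i + 1) (nums.length : Int) 1).foldl
              (fun s j => pvInnerStep s (PySem.List.pyGetD nums j 0))
              (PySem.List.pyGetD nums i 0, st.1, st.2)).2.2)))
    (1, 1)).2

-- ===== PORT B =====
-- the 'while stack and stack[-1] <= x: stack.pop()' loop (stack held top-first)
def pvPopLE (x : Int) : List Int → List Int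
  | [] => []
  | t :: s => if t ≤ x then pvPopLE x s else t :: s

def fun_py_alt (nums : List Int) : Int :=
  (nums.reverse.foldl
    (fun (st : List Int × Int) x =>
      let stack := x :: pvPopLE x st.1
      (stack, if (stack.length : Int) > st.2 then (stack.length : Int) else st.2))
    ([], 1)).2

-- ===== PRECONDITION & SPEC =====
def Spec_fun_py (nums : List Int) (out : Int) : Prop := out = fun_py_alt nums
instance (nums : List Int) (out : Int) : Decidable (Spec_fun_py nums out) := by unfold Spec_fun_py; infer_instance

-- ===== CLAIM (what is proved, stated in full; the proofs are below) =====
def Claim_equal_fun_py : Prop := ∀ (nums : List Int), Dom_fun_py nums → Spec_fun_py nums (fun_py nums)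

-- ===== LEMMAS AND PROOFS =====

-- the chain of greedy records of a list: head, then records of the tail above the head
def pvChain : List Int → List Int
  | [] => []
  | x :: xs => x :: pvPopLE x (pvChain xs)

-- number of records strictly above threshold t
def pvF (t : Int) : List Int → Int
  | [] => 0
  | y :: ys => if y > t then 1 + pvF y ys else pvF t ys

-- final value of temp in A's inner loop
def pvT (t : Int) : List Int → Int
  | [] => t
  | y :: ys => if y > t then pvT y ys else pvT t ys

-- A's outer loop as a recursion over suffixes
def pvAout (r : Int) : List Int → Int
  | [] => r
  | x :: xs => pvAout (if 1 + pvF x xs > r then 1 + pvF x xs else r) xs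

-- B's running maximum over suffix chain lengths
def pvM : List Int → Int
  | [] => 1
  | x :: xs =>
      if ((pvChain (x :: xs)).length : Int) > pvM xs then ((pvChain (x :: xs)).length : Int) else pvM xs

theorem pvF_nonneg (ys : List Int) (t : Int) : 0 ≤ pvF t ys := by
  induction ys generalizing t with
  | nil => simp [pvF]
  | cons y ys ih => simp only [pvF]; split <;> [linarith [ih y]; exact ih t]

theorem pvPopLE_popLE (l : List Int) (t y : Int) (h : y ≤ t) :
    pvPopLE t (pvPopLE y l) = pvPopLE t l := by
  induction l with
  | nil => rfl
  | cons a l ih =>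
      by_cases ha : a ≤ y
      · simp [pvPopLE, ha, le_trans ha h, ih]
      · simp [pvPopLE, ha]

theorem pvF_chain (ys : List Int) (t : Int) :
    pvF t ys = ((pvPopLE t (pvChain ys)).length : Int) := by
  induction ys generalizing t with
  | nil => simp [pvF, pvChain, pvPopLE]
  | cons y ys ih =>
      by_cases hy : y > t
      · have : ¬ y ≤ t := by omega
        simp [pvF, pvChain, pvPopLE, hy, this, ih y]
        ring
      · have hle : y ≤ t := by omega
        simp [pvF, pvChain, pvPopLE, hy, hle, pvPopLE_popLE _ _ _ hle, ih t]

theorem inner_char (ys : List Int) (t c r : Int) (h : c ≤ r) :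
    ys.foldl pvInnerStep (t, c, r) =
      (pvT t ys, c + pvF t ys, if c + pvF t ys > r then c + pvF t ys else r) := by
  induction ys generalizing t c r with
  | nil =>
      simp only [List.foldl_nil, pvF, pvT, add_zero]
      have : ¬ c > r := by omega
      simp [this]
  | cons y ys ih =>
      simp only [List.foldl_cons, pvInnerStep, pvF, pvT]
      by_cases hy : y > t
      · have hf : 0 ≤ pvF y ys := pvF_nonneg ys y
        have h1 : c + 1 ≤ if c + 1 > r then c + 1 else r := by split <;> omega
        rw [if_pos hy, ih y (c + 1) _ h1]
        simp only [if_pos hy]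
        refine Prod.ext rfl (Prod.ext (by ring_nf) ?_)
        simp only []
        split_ifs <;> omega
      · rw [if_neg hy, ih t c r h]
        simp [hy]

theorem outer_char (nums : List Int) :
    ∀ m k (r : Int), nums.length - k ≤ m → 1 ≤ r →
      (((PySem.List.pyRange (k : Int) (nums.length : Int) 1).foldl
          (fun (st : Int × Int) i =>
            (1, (((PySem.List.pyRange (i + 1) (nums.length : Int) 1).foldl
                    (fun s j => pvInnerStep s (PySem.List.pyGetD nums j 0))
                    (PySem.List.pyGetD nums i 0, st.1, st.2)).2.2)))
          (1, r)).2) = pvAout r (nums.drop k) := by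
  intro m
  induction m with
  | zero =>
      intro k r hk _
      have hge : nums.length ≤ k := by omega
      rw [PySem.List.pyRange_one_eq_nil (by exact_mod_cast hge)]
      simp [List.drop_eq_nil_of_le hge, pvAout]
  | succ m ih =>
      intro k r hk hr
      by_cases hlt : k < nums.length
      · rw [PySem.List.pyRange_one_cons (by exact_mod_cast hlt)]
        rw [List.foldl_cons]
        have ha : (0 : Int) ≤ (k : Int) + 1 := by positivity
        have hcast : ((k : Int) + 1) = ((k + 1 : Nat) : Int) := by push_cast; ring
        rw [hcast, PySem.List.foldl_pyRange_pyGetD' nums 0 pvInnerStep _ (by positivity)]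
        have htoNat : ((k + 1 : Nat) : Int).toNat = k + 1 := by omega
        rw [htoNat]
        have hget : PySem.List.pyGetD nums (k : Int) 0 = nums[k] := by
          rw [PySem.List.pyGetD_natCast]
          exact List.getD_eq_getElem _ _ hlt
        rw [hget, inner_char _ _ _ _ hr]
        have hdrop : nums.drop k = nums[k] :: nums.drop (k + 1) :=
          List.drop_eq_getElem_cons hlt
        rw [hdrop]
        simp only [pvAout]
        have hr' : (1 : Int) ≤ if 1 + pvF nums[k] (nums.drop (k + 1)) > r
            then 1 + pvF nums[k] (nums.drop (k + 1)) else r := by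
          split <;> omega
        exact ih (k + 1) _ (by omega) hr'
      · have hge : nums.length ≤ k := by omega
        rw [PySem.List.pyRange_one_eq_nil (by exact_mod_cast hge)]
        simp [List.drop_eq_nil_of_le hge, pvAout]

theorem alt_char (nums : List Int) :
    nums.foldr
      (fun x (st : List Int × Int) =>
        (fun (st : List Int × Int) (x : Int) =>
          let stack := x :: pvPopLE x st.1
          (stack, if (stack.length : Int) > st.2 then (stack.length : Int) else st.2)) st x)
      ([], 1) = (pvChain nums, pvM nums) := by
  induction nums with
  | nil => simp [pvChain, pvM]
  | cons x xs ih =>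
      simp only [List.foldr_cons, ih]
      simp [pvChain, pvM]

theorem alt_eq (nums : List Int) : fun_py_alt nums = pvM nums := by
  unfold fun_py_alt
  rw [List.foldl_reverse, alt_char]

theorem pvM_ge_one (l : List Int) : 1 ≤ pvM l := by
  induction l with
  | nil => simp [pvM]
  | cons x xs ih => simp only [pvM]; split <;> omega

theorem chain_len (x : Int) (xs : List Int) :
    ((pvChain (x :: xs)).length : Int) = 1 + pvF x xs := by
  simp [pvChain, pvF_chain]
  ring

theorem aout_eq_M (l : List Int) : ∀ r : Int, 1 ≤ r →
    pvAout r l = if pvM l > r then pvM l else r := by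
  induction l with
  | nil =>
      intro r hr
      simp only [pvAout, pvM]
      have : ¬ (1 : Int) > r := by omega
      simp [this]
  | cons x xs ih =>
      intro r hr
      simp only [pvAout, pvM, chain_len]
      have hf : 0 ≤ pvF x xs := pvF_nonneg xs x
      have hr' : (1 : Int) ≤ if 1 + pvF x xs > r then 1 + pvF x xs else r := by split <;> omega
      rw [ih _ hr']
      split_ifs <;> omega

-- ===== VERDICT (by name: the statement is the Claim_ definition above) =====
theorem fun_py_spec : Claim_equal_fun_py := by
  intro nums _
  unfold Spec_fun_py
  have hA := outer_char nums nums.length 0 1 (by omega) (by omega)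
  simp only [Nat.cast_zero, List.drop_zero] at hA
  have : fun_py nums = pvAout 1 nums := hA
  rw [this, aout_eq_M nums 1 (by omega), alt_eq]
  have h1 := pvM_ge_one nums
  split <;> omega
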